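-- pv_equiv track=rewrite | github.com/bunchesofdonald/advent-of-code | 2021/day4.py | score_all_boards
-- ===== SOURCE A (Python) =====
-- def board_to_sets(board):
--     board_size = len(board[0])
--     board_sets = []
--     for row in board:
--         board_sets.append(set(row))
--
--     for i in range(board_size):
--         board_set = set()
--         for j in range(board_size):
--             board_set.add(board[j][i])
--
--         board_sets.append(board_set)
--
--     return board_sets
--
-- def score_all_boards(draw_order, boards):
--     board_scores = []
--     complete_boards = set()
--     called_numbers = set()
--     for last_called in draw_order:
--         called_numbers.add(last_called)
--         for i, board in enumerate(boards):
--             if i not in complete_boards and board_complete(called_numbers, board):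
--                 board_scores.append(board_score(board, called_numbers, last_called))
--                 complete_boards.add(i)
--
--     return board_scores
--
-- def board_score(board, called_numbers, last_called):
--     board_score = 0
--     for row in board:
--         for number in row:
--             if number not in called_numbers:
--                 board_score += number
--
--     return board_score * last_called
--
-- def board_complete(called_numbers, board):
--     board_sets = board_to_sets(board)
--     for number_set in board_sets:
--         if len(number_set - called_numbers) == 0:
--             return True
--
--     return False
-- ===== SOURCE B (Python) =====
-- def score_all_boards(draw_order, boards):
--     # Closed-form per board: first time each value is drawn determines when each
--     # row/column completes; bucket board scores by completion draw index.
--     if not draw_order: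
--         return []
--     n_draws = len(draw_order)
--     first_pos = {}
--     for t, v in enumerate(draw_order):
--         if v not in first_pos:
--             first_pos[v] = t
--
--     def completion_index(board):
--         n = len(board[0])
--         lines = list(board) + [[board[j][i] for j in range(n)] for i in range(n)]
--         best = None
--         for line in lines:
--             if all(v in first_pos for v in line):
--                 t = 0
--                 for v in line:
--                     p = first_pos[v]
--                     if p > t:
--                         t = p
--                 if best is None or t < best:
--                     best = t
--         return best
--
--     buckets = {}
--     for board in boards:
--         t = completion_index(board)
--         if t is not None:
--             unmarked = 0
--             for row in board:
--                 for v in row: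
--                     if first_pos.get(v, n_draws) > t:
--                         unmarked += v
--             buckets.setdefault(t, []).append(unmarked * draw_order[t])
--
--     out = []
--     for t in range(n_draws):
--         out.extend(buckets.get(t, []))
--     return out
-- ===== Notes on version B (the rewrite author's own statement) =====
-- stated objective: faster
-- what changed: A re-simulates the game: at every draw it rebuilds every board's row/column sets and re-tests completion; B builds a value->first-draw-index dict once, computes each board's completion draw as the min over its lines of the max first-occurrence index, and buckets scores by completion draw, eliminating the per-draw rescan.
import Mathlib
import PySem

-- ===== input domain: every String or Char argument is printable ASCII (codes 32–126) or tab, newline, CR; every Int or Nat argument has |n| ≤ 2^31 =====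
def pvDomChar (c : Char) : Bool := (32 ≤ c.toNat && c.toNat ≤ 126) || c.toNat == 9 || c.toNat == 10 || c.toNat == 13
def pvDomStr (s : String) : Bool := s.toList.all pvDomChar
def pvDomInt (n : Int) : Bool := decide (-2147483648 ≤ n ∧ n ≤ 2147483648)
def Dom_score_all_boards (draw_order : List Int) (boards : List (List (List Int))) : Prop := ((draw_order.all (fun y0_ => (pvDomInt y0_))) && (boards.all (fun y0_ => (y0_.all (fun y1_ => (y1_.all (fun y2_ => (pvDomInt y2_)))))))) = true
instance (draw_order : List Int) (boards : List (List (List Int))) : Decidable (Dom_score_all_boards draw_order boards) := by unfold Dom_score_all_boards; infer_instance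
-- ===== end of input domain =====

-- B replaces A's per-draw re-simulation (rebuilding every board's row/column sets at every draw)
-- by a per-board completion index computed from a first-occurrence dict, bucketing scores by
-- completion draw; objective: faster (per-board closed form instead of per-draw rescan).


-- ===== PORT A =====
-- board_to_sets: row sets, then column sets (board_size = len(board[0]); indexing via pyGetD,
-- exact on inputs Pre_ admits — Python raises IndexError outside them)
def pvBoardToSets (board : List (List Int)) : List (PySem.Set Int) :=
  let board_size : Int := ((PySem.List.pyGetD board 0 []).length : Int)
  let board_sets := board.foldl (fun acc row => acc ++ [PySem.Set.ofList row]) []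
  (PySem.List.pyRange 0 board_size 1).foldl (fun acc i =>
    let board_set := (PySem.List.pyRange 0 board_size 1).foldl
      (fun s j => PySem.Set.add s (PySem.List.pyGetD (PySem.List.pyGetD board j []) i 0))
      PySem.Set.empty
    acc ++ [board_set]) board_sets

def pvBoardScore (board : List (List Int)) (called : PySem.Set Int) (last : Int) : Int :=
  (board.foldl (fun acc row =>
    row.foldl (fun acc n => if PySem.Set.contains called n then acc else acc + n) acc) 0) * last

-- for-loop with early 'return True' = any
def pvBoardComplete (called : PySem.Set Int) (board : List (List Int)) : Bool :=
  (pvBoardToSets board).any (fun s => PySem.Set.len (PySem.Set.diff s called) == 0)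

def score_all_boards (draw_order : List Int) (boards : List (List (List Int))) : List Int :=
  (draw_order.foldl
    (fun (st : List Int × PySem.Set Int × PySem.Set Int) last_called =>
      let called := PySem.Set.add st.2.2 last_called
      let inner := (PySem.List.enumerate boards 0).foldl
        (fun (p : List Int × PySem.Set Int) ib =>
          if ¬ PySem.Set.contains p.2 ib.1 ∧ pvBoardComplete called ib.2 then
            (p.1 ++ [pvBoardScore ib.2 called last_called], PySem.Set.add p.2 ib.1)
          else p)
        (st.1, st.2.1)
      (inner.1, inner.2, called))
    ([], PySem.Set.empty, PySem.Set.empty)).1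

-- ===== PORT B =====
-- first_pos: value -> index of its first occurrence in the draw order
def pvFirstPos (draw_order : List Int) : PySem.Dict Int Int :=
  (PySem.List.enumerate draw_order 0).foldl
    (fun d tv => if d.contains tv.2 then d else d.insert tv.2 tv.1) PySem.Dict.empty

-- lines = list(board) + [columns]
def pvLines (board : List (List Int)) : List (List Int) :=
  let n : Int := ((PySem.List.pyGetD board 0 []).length : Int)
  board ++ (PySem.List.pyRange 0 n 1).map (fun i =>
    (PySem.List.pyRange 0 n 1).map (fun j =>
      PySem.List.pyGetD (PySem.List.pyGetD board j []) i 0))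

-- completion_index: over lines whose values are all drawn, the least max-first-position
def pvCompletionIndex (board : List (List Int)) (firstPos : PySem.Dict Int Int) : Option Int :=
  (pvLines board).foldl (fun best line =>
    if line.all (fun v => firstPos.contains v) then
      let t := line.foldl (fun t v =>
        if firstPos.getD v 0 > t then firstPos.getD v 0 else t) 0
      match best with
      | none => some t
      | some b => if t < b then some t else some b
    else best) none

-- unmarked sum at completion index t, times the draw at t
def pvScoreOf (draw_order : List Int) (t : Int) (board : List (List Int)) : Int :=
  (board.foldl (fun acc row =>
    row.foldl (fun acc v =>
      if (pvFirstPos draw_order).getD v ((draw_order.length : Int)) > t then acc + v else acc) acc) 0)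
  * PySem.List.pyGetD draw_order t 0

-- buckets.setdefault(t, []).append(s) = insert t (getD t [] ++ [s])
def pvBucketStep (draw_order : List Int) (bk : PySem.Dict Int (List Int))
    (board : List (List Int)) : PySem.Dict Int (List Int) :=
  match pvCompletionIndex board (pvFirstPos draw_order) with
  | none => bk
  | some t => bk.insert t (bk.getD t [] ++ [pvScoreOf draw_order t board])

def pvBuckets (draw_order : List Int) (boards : List (List (List Int))) : PySem.Dict Int (List Int) :=
  boards.foldl (pvBucketStep draw_order) PySem.Dict.empty

def score_all_boards_alt (draw_order : List Int) (boards : List (List (List Int))) : List Int :=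
  if draw_order = [] then [] else
  (PySem.List.pyRange 0 ((draw_order.length : Int)) 1).foldl
    (fun out t => out ++ (pvBuckets draw_order boards).getD t []) []

-- ===== PRECONDITION & SPEC =====
-- Pre_ excludes exactly the inputs where Python A raises IndexError: a nonempty draw order together
-- with some board that is empty or too short/ragged for the column scan board[j][i], j,i < len(board[0]).
def Pre_score_all_boards (draw_order : List Int) (boards : List (List (List Int))) : Prop :=
  draw_order = [] ∨ ∀ board ∈ boards, board ≠ [] ∧
    (PySem.List.pyGetD board 0 []).length ≤ board.length ∧
    ∀ j < (PySem.List.pyGetD board 0 []).length,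
      (PySem.List.pyGetD board 0 []).length ≤ (board.getD j []).length
instance (draw_order : List Int) (boards : List (List (List Int))) : Decidable (Pre_score_all_boards draw_order boards) := by unfold Pre_score_all_boards; infer_instance

def pvWitness_score_all_boards : List Int × List (List (List Int)) :=
  ([5, 1, 3, 2], [[[1, 3], [2, 5]], [[4, 4], [4, 4]]])

def Spec_score_all_boards (draw_order : List Int) (boards : List (List (List Int))) (out : List Int) : Prop := out = score_all_boards_alt draw_order boards
instance (draw_order : List Int) (boards : List (List (List Int))) (out : List Int) : Decidable (Spec_score_all_boards draw_order boards out) := by unfold Spec_score_all_boards; infer_instance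

-- ===== CLAIM (what is proved, stated in full; the proofs are below) =====
def Claim_equal_score_all_boards : Prop := ∀ (draw_order : List Int) (boards : List (List (List Int))), Dom_score_all_boards draw_order boards → Pre_score_all_boards draw_order boards → Spec_score_all_boards draw_order boards (score_all_boards draw_order boards)

-- ===== LEMMAS AND PROOFS =====

-- A's inner per-board step and outer per-draw step, named for the proofs
def pvIStep (called : PySem.Set Int) (last : Int) :
    (List Int × PySem.Set Int) → (Int × List (List Int)) → (List Int × PySem.Set Int) :=
  fun p ib =>
    if ¬ PySem.Set.contains p.2 ib.1 ∧ pvBoardComplete called ib.2 then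
      (p.1 ++ [pvBoardScore ib.2 called last], PySem.Set.add p.2 ib.1)
    else p

def pvAStep (boards : List (List (List Int))) :
    (List Int × PySem.Set Int × PySem.Set Int) → Int → (List Int × PySem.Set Int × PySem.Set Int) :=
  fun st last_called =>
    let called := PySem.Set.add st.2.2 last_called
    let inner := (PySem.List.enumerate boards 0).foldl (pvIStep called last_called) (st.1, st.2.1)
    (inner.1, inner.2, called)

theorem pvA_eq (draw_order : List Int) (boards : List (List (List Int))) :
    score_all_boards draw_order boards
      = (draw_order.foldl (pvAStep boards) ([], PySem.Set.empty, PySem.Set.empty)).1 := rfl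

theorem pv_fp_fold (draws : List Int) (s : Int) (d : PySem.Dict Int Int) (v : Int) :
    ((PySem.List.enumerate draws s).foldl
      (fun d tv => if d.contains tv.2 then d else d.insert tv.2 tv.1) d).get? v
    = if d.contains v then d.get? v
      else (PySem.List.index? draws v).map (fun (k : Nat) => s + (k : Int)) := by
  induction draws generalizing s d with
  | nil =>
    simp only [PySem.List.enumerate_nil, List.foldl_nil, PySem.List.index?_eq_idxOf?,
      List.idxOf?_nil, Option.map_none]
    by_cases h : d.contains v = true
    · rw [if_pos h]
    · rw [if_neg h, (PySem.Dict.get?_eq_none_iff_contains d v).2 (by simpa using h)]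
  | cons x xs ih =>
    rw [PySem.List.enumerate_cons, List.foldl_cons]
    dsimp only
    by_cases hx : d.contains x = true
    · rw [if_pos hx, ih]
      by_cases hv : v = x
      · subst hv; rw [if_pos hx, if_pos hx]
      · by_cases hc : d.contains v = true
        · rw [if_pos hc, if_pos hc]
        · rw [if_neg hc, if_neg hc,
            PySem.List.index?_cons_of_ne xs (fun he => hv he.symm), Option.map_map]
          cases PySem.List.index? xs v <;> simp <;> omega
    · rw [if_neg hx, ih]
      by_cases hv : v = x
      · subst hv
        rw [if_pos (PySem.Dict.contains_insert_self d v s), if_neg hx,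
          PySem.Dict.get?_insert_self, PySem.List.index?_cons_self]
        simp
      · have hcc : (d.insert x s).contains v = d.contains v := by
          rw [PySem.Dict.contains_insert]; simp [hv]
        rw [hcc, PySem.Dict.get?_insert_of_ne d s hv,
          PySem.List.index?_cons_of_ne xs (fun he => hv he.symm), Option.map_map]
        by_cases hc : d.contains v = true
        · rw [if_pos hc, if_pos hc]
        · rw [if_neg hc, if_neg hc]
          cases PySem.List.index? xs v <;> simp <;> omega

theorem pv_fp_get (draws : List Int) (v : Int) :
    (pvFirstPos draws).get? v = (PySem.List.index? draws v).map (fun (k : Nat) => (k : Int)) := by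
  rw [pvFirstPos, pv_fp_fold, if_neg (by simp [PySem.Dict.contains_empty])]
  simp

theorem pv_mem_take (xs : List Int) (v : Int) (m : Nat) :
    v ∈ xs.take m ↔ ∃ k, PySem.List.index? xs v = some k ∧ k < m := by
  induction xs generalizing m with
  | nil => simp [PySem.List.index?_eq_idxOf?]
  | cons x xs ih =>
    cases m with
    | zero => simp
    | succ m =>
      rw [List.take_succ_cons]
      by_cases hv : v = x
      · subst hv
        constructor
        · intro _; exact ⟨0, PySem.List.index?_cons_self v xs, by omega⟩
        · intro _; exact List.mem_cons_self
      · rw [PySem.List.index?_cons_of_ne xs (fun he => hv he.symm)]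
        constructor
        · intro hmem
          rcases List.mem_cons.1 hmem with he | hmem'
          · exact absurd he hv
          · rcases (ih m).1 hmem' with ⟨k, hk, hkm⟩
            exact ⟨k + 1, by rw [hk]; rfl, by omega⟩
        · rintro ⟨k, hk, hkm⟩
          cases hidx : PySem.List.index? xs v with
          | none => rw [hidx] at hk; exact absurd hk (by simp)
          | some k' =>
            rw [hidx] at hk
            have hk1 : k = k' + 1 := by
              have := hk.symm
              simpa using this
            exact List.mem_cons.2 (Or.inr ((ih m).2 ⟨k', hidx, by omega⟩))

theorem pv_len_diff (xs : List Int) (called : PySem.Set Int) :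
    ((PySem.Set.len (PySem.Set.diff (PySem.Set.ofList xs) called) == 0) = true)
      ↔ ∀ v ∈ xs, v ∈ called := by
  rw [PySem.Set.len]
  simp only [beq_iff_eq, Nat.cast_eq_zero, List.length_eq_zero_iff,
    List.eq_nil_iff_forall_not_mem]
  constructor
  · intro h v hv
    by_contra hnc
    exact h v ((PySem.Set.mem_diff _ _ _).2 ⟨(PySem.Set.mem_ofList _ _).2 hv, hnc⟩)
  · intro h y hy
    rcases (PySem.Set.mem_diff _ _ _).1 hy with ⟨h1, h2⟩
    exact h2 (h y ((PySem.Set.mem_ofList _ _).1 h1))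

theorem pv_sets (board : List (List Int)) :
    pvBoardToSets board = (pvLines board).map PySem.Set.ofList := by
  rw [pvBoardToSets, pvLines]
  rw [PySem.List.foldl_append_singleton_eq_map, PySem.List.foldl_append_singleton_eq_map]
  rw [List.map_append, List.map_map, List.nil_append]
  congr 1
  apply List.map_congr_left
  intro i _
  rw [Function.comp_apply, ← PySem.Set.update_map_eq_foldl_add, PySem.Set.update_empty]

theorem pv_complete_iff (called : PySem.Set Int) (board : List (List Int)) :
    pvBoardComplete called board = true ↔ ∃ line ∈ pvLines board, ∀ v ∈ line, v ∈ called := by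
  rw [pvBoardComplete, pv_sets, List.any_map, List.any_eq_true]
  refine exists_congr (fun line => and_congr_right (fun _ => ?_))
  exact pv_len_diff line called

theorem pv_max_le (d : PySem.Dict Int Int) (line : List Int) (a c : Int) :
    line.foldl (fun t v => if d.getD v 0 > t then d.getD v 0 else t) a ≤ c
      ↔ a ≤ c ∧ ∀ v ∈ line, d.getD v 0 ≤ c := by
  induction line generalizing a with
  | nil => simp
  | cons v l ih =>
    rw [List.foldl_cons, ih]
    have ha : ((if d.getD v 0 > a then d.getD v 0 else a) ≤ c) ↔ (a ≤ c ∧ d.getD v 0 ≤ c) := by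
      split_ifs with h <;> omega
    rw [ha]
    simp only [List.mem_cons]
    constructor
    · rintro ⟨⟨h1, h2⟩, h3⟩
      exact ⟨h1, fun w hw => hw.elim (fun he => he ▸ h2) (h3 w)⟩
    · rintro ⟨h1, h2⟩
      exact ⟨⟨h1, h2 v (Or.inl rfl)⟩, fun w hw => h2 w (Or.inr hw)⟩

theorem pv_max_ge (d : PySem.Dict Int Int) (line : List Int) (a : Int) :
    a ≤ line.foldl (fun t v => if d.getD v 0 > t then d.getD v 0 else t) a := by
  induction line generalizing a with
  | nil => simp
  | cons v l ih =>
    rw [List.foldl_cons]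
    refine le_trans ?_ (ih _)
    split_ifs with h <;> omega

theorem pv_min_fold_nonneg (d : PySem.Dict Int Int) (lines : List (List Int)) (best : Option Int)
    (h : ∀ c, best = some c → 0 ≤ c) :
    ∀ c, lines.foldl (fun best line =>
      if line.all (fun v => d.contains v) then
        let t := line.foldl (fun t v => if d.getD v 0 > t then d.getD v 0 else t) 0
        match best with
        | none => some t
        | some b => if t < b then some t else some b
      else best) best = some c → 0 ≤ c := by
  induction lines generalizing best with
  | nil => simpa using h
  | cons line ls ih =>
    rw [List.foldl_cons]
    apply ih
    intro c hc
    by_cases hall : line.all (fun v => d.contains v) = true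
    · rw [if_pos hall] at hc
      cases best with
      | none =>
        have := pv_max_ge d line 0
        simp only [Option.some.injEq] at hc
        omega
      | some b =>
        have hb := h b rfl
        have := pv_max_ge d line 0
        dsimp only at hc
        split_ifs at hc <;> simp only [Option.some.injEq] at hc <;> omega
    · rw [if_neg hall] at hc
      exact h c hc

theorem pv_CI_nonneg (board : List (List Int)) (d : PySem.Dict Int Int) (c : Int)
    (h : pvCompletionIndex board d = some c) : 0 ≤ c :=
  pv_min_fold_nonneg d (pvLines board) none (by simp) c h

theorem pv_min_fold (d : PySem.Dict Int Int) (lines : List (List Int)) (best : Option Int) (c : Int) :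
    (∃ c', lines.foldl (fun best line =>
      if line.all (fun v => d.contains v) then
        let t := line.foldl (fun t v => if d.getD v 0 > t then d.getD v 0 else t) 0
        match best with
        | none => some t
        | some b => if t < b then some t else some b
      else best) best = some c' ∧ c' ≤ c)
    ↔ ((∃ c', best = some c' ∧ c' ≤ c) ∨
        ∃ line ∈ lines, line.all (fun v => d.contains v) = true ∧
          line.foldl (fun t v => if d.getD v 0 > t then d.getD v 0 else t) 0 ≤ c) := by
  induction lines generalizing best with
  | nil => simp
  | cons line ls ih =>
    rw [List.foldl_cons, ih]
    by_cases hall : line.all (fun v => d.contains v) = true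
    · cases best with
      | none =>
        rw [if_pos hall]
        dsimp only
        constructor
        · rintro (⟨c', hc', hle⟩ | ⟨l, hl, h1, h2⟩)
          · refine Or.inr ⟨line, List.mem_cons_self, hall, ?_⟩
            rw [Option.some.inj hc']; exact hle
          · exact Or.inr ⟨l, List.mem_cons_of_mem _ hl, h1, h2⟩
        · rintro (⟨c', hc', hle⟩ | ⟨l, hl, h1, h2⟩)
          · exact absurd hc' (by simp)
          · rcases List.mem_cons.1 hl with he | hm
            · subst he; exact Or.inl ⟨_, rfl, h2⟩
            · exact Or.inr ⟨l, hm, h1, h2⟩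
      | some b =>
        rw [if_pos hall]
        dsimp only
        split_ifs with hlt
        · constructor
          · rintro (⟨c', hc', hle⟩ | ⟨l, hl, h1, h2⟩)
            · refine Or.inr ⟨line, List.mem_cons_self, hall, ?_⟩
              rw [Option.some.inj hc']; exact hle
            · exact Or.inr ⟨l, List.mem_cons_of_mem _ hl, h1, h2⟩
          · rintro (⟨c', hc', hle⟩ | ⟨l, hl, h1, h2⟩)
            · have hb := Option.some.inj hc'
              exact Or.inl ⟨_, rfl, by omega⟩
            · rcases List.mem_cons.1 hl with he | hm
              · subst he; exact Or.inl ⟨_, rfl, h2⟩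
              · exact Or.inr ⟨l, hm, h1, h2⟩
        · constructor
          · rintro (⟨c', hc', hle⟩ | ⟨l, hl, h1, h2⟩)
            · refine Or.inl ⟨c', hc', hle⟩
            · exact Or.inr ⟨l, List.mem_cons_of_mem _ hl, h1, h2⟩
          · rintro (⟨c', hc', hle⟩ | ⟨l, hl, h1, h2⟩)
            · exact Or.inl ⟨c', hc', hle⟩
            · rcases List.mem_cons.1 hl with he | hm
              · subst he
                have hble : b ≤ List.foldl (fun t v => if d.getD v 0 > t then d.getD v 0 else t) 0 l := by omega
                exact Or.inl ⟨b, rfl, by omega⟩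
              · exact Or.inr ⟨l, hm, h1, h2⟩
    · rw [if_neg hall]
      constructor
      · rintro (h | ⟨l, hl, h1, h2⟩)
        · exact Or.inl h
        · exact Or.inr ⟨l, List.mem_cons_of_mem _ hl, h1, h2⟩
      · rintro (h | ⟨l, hl, h1, h2⟩)
        · exact Or.inl h
        · rcases List.mem_cons.1 hl with he | hm
          · subst he; exact absurd h1 hall
          · exact Or.inr ⟨l, hm, h1, h2⟩

theorem pv_key (draws : List Int) (t : Nat) (board : List (List Int)) :
    pvBoardComplete (PySem.Set.ofList (draws.take (t+1))) board = true
      ↔ ∃ c, pvCompletionIndex board (pvFirstPos draws) = some c ∧ c ≤ (t : Int) := by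
  rw [pv_complete_iff, pvCompletionIndex, pv_min_fold]
  simp only [reduceCtorEq, false_and, exists_false, false_or]
  refine exists_congr fun line => and_congr_right fun _ => ?_
  rw [pv_max_le, List.all_eq_true]
  constructor
  · intro h
    refine ⟨fun v hv => ?_, ⟨by omega, fun v hv => ?_⟩⟩
    · rcases (pv_mem_take draws v (t+1)).1 ((PySem.Set.mem_ofList _ _).1 (h v hv)) with ⟨k, hk, _⟩
      rw [PySem.Dict.contains_eq_isSome_get?, pv_fp_get, hk]
      rfl
    · rcases (pv_mem_take draws v (t+1)).1 ((PySem.Set.mem_ofList _ _).1 (h v hv)) with ⟨k, hk, hkm⟩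
      rw [PySem.Dict.getD_eq_get?_getD, pv_fp_get, hk]
      simp
      omega
  · rintro ⟨hall, _, hle⟩ v hv
    have hc := hall v hv
    rw [PySem.Dict.contains_eq_isSome_get?, pv_fp_get] at hc
    cases hk : PySem.List.index? draws v with
    | none => rw [hk] at hc; simp at hc
    | some k =>
      have hg := hle v hv
      rw [PySem.Dict.getD_eq_get?_getD, pv_fp_get, hk] at hg
      simp at hg
      exact (PySem.Set.mem_ofList _ _).2 ((pv_mem_take draws v (t+1)).2 ⟨k, hk, by omega⟩)

theorem pv_score (draws : List Int) (t : Nat) (ht : t < draws.length)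
    (board : List (List Int)) (last : Int) :
    pvBoardScore board (PySem.Set.ofList (draws.take (t+1))) last
      = (board.foldl (fun acc row =>
          row.foldl (fun acc v =>
            if (pvFirstPos draws).getD v ((draws.length : Int)) > (t : Int) then acc + v else acc) acc) 0)
        * last := by
  rw [pvBoardScore]
  congr 1
  have hstep : (fun (acc : Int) (n : Int) =>
      if PySem.Set.contains (PySem.Set.ofList (draws.take (t+1))) n then acc else acc + n)
    = (fun (acc : Int) (v : Int) =>
      if (pvFirstPos draws).getD v ((draws.length : Int)) > (t : Int) then acc + v else acc) := by
    funext acc v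
    by_cases h : ∃ k, PySem.List.index? draws v = some k ∧ k < t + 1
    · rcases h with ⟨k, hk, hkm⟩
      have h1 : PySem.Set.contains (PySem.Set.ofList (draws.take (t+1))) v = true :=
        (PySem.Set.contains_iff _ _).2
          ((PySem.Set.mem_ofList _ _).2 ((pv_mem_take draws v (t+1)).2 ⟨k, hk, hkm⟩))
      have h2 : ¬((pvFirstPos draws).getD v ((draws.length : Int)) > (t : Int)) := by
        rw [PySem.Dict.getD_eq_get?_getD, pv_fp_get, hk]
        simp
        omega
      rw [if_pos h1, if_neg h2]
    · have h1 : ¬(PySem.Set.contains (PySem.Set.ofList (draws.take (t+1))) v = true) := by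
        intro hc
        exact h ((pv_mem_take draws v (t+1)).1 ((PySem.Set.mem_ofList _ _).1
          ((PySem.Set.contains_iff _ _).1 hc)))
      have h2 : (pvFirstPos draws).getD v ((draws.length : Int)) > (t : Int) := by
        rw [PySem.Dict.getD_eq_get?_getD, pv_fp_get]
        cases hk : PySem.List.index? draws v with
        | none => simp; omega
        | some k =>
          have hkl := PySem.List.getElem_of_index?_eq_some hk
          have hnk : ¬(k < t + 1) := fun hlt => h ⟨k, hk, hlt⟩
          simp
          omega
      rw [if_neg h1, if_pos h2]
  simp only [hstep]

theorem pv_buckets_getD (draws : List Int) (bs : List (List (List Int)))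
    (bk : PySem.Dict Int (List Int)) (q : Int) :
    (bs.foldl (pvBucketStep draws) bk).getD q []
      = bk.getD q [] ++ (bs.filter
          (fun b => pvCompletionIndex b (pvFirstPos draws) == some q)).map (pvScoreOf draws q) := by
  induction bs generalizing bk with
  | nil => simp
  | cons b bs ih =>
    rw [List.foldl_cons, ih, List.filter_cons]
    cases hci : pvCompletionIndex b (pvFirstPos draws) with
    | none =>
      simp only [pvBucketStep, hci]
      simp
    | some u =>
      simp only [pvBucketStep, hci]
      by_cases hq : u = q
      · subst hq
        simp only [beq_self_eq_true, if_pos]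
        rw [PySem.Dict.getD_insert, if_pos rfl, List.map_cons]
        simp
      · have hbq : ((some u == some q) : Bool) = false := by
          simp [hq]
        rw [hbq]
        simp only [Bool.false_eq_true, if_false]
        rw [PySem.Dict.getD_insert, if_neg (fun he => hq he.symm)]

theorem pv_inner (draws : List Int) (t : Nat) (ht : t < draws.length)
    (bs : List (List (List Int))) (s : Int) (scores : List Int) (comp : PySem.Set Int)
    (H : ∀ (k : Nat) (hk : k < bs.length),
      ((comp.contains (s + (k : Int)) = true) ↔
        ∃ c, pvCompletionIndex (bs.get ⟨k, hk⟩) (pvFirstPos draws) = some c ∧ c < (t : Int))) :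
    (((PySem.List.enumerate bs s).foldl
        (pvIStep (PySem.Set.ofList (draws.take (t+1))) (draws.getD t 0)) (scores, comp)).1
      = scores ++ (bs.filter
          (fun b => pvCompletionIndex b (pvFirstPos draws) == some (t : Int))).map (pvScoreOf draws (t : Int)))
    ∧ ∀ j : Int,
        (((PySem.List.enumerate bs s).foldl
          (pvIStep (PySem.Set.ofList (draws.take (t+1))) (draws.getD t 0)) (scores, comp)).2.contains j = true
        ↔ (comp.contains j = true ∨ ∃ (k : Nat) (hk : k < bs.length), j = s + (k : Int) ∧
            ∃ c, pvCompletionIndex (bs.get ⟨k, hk⟩) (pvFirstPos draws) = some c ∧ c = (t : Int))) := by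
  induction bs generalizing s scores comp with
  | nil =>
    rw [PySem.List.enumerate_nil, List.foldl_nil]
    refine ⟨by simp, fun j => ?_⟩
    simp
  | cons b bs ih =>
    rw [PySem.List.enumerate_cons, List.foldl_cons]
    have hcontains : comp.contains s = true
        ↔ ∃ c, pvCompletionIndex b (pvFirstPos draws) = some c ∧ c < (t : Int) := by
      have h0 := H 0 (by simp)
      simpa using h0
    have hcompl : pvBoardComplete (PySem.Set.ofList (draws.take (t+1))) b = true
        ↔ ∃ c, pvCompletionIndex b (pvFirstPos draws) = some c ∧ c ≤ (t : Int) :=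
      pv_key draws t b
    have hIS : pvIStep (PySem.Set.ofList (draws.take (t+1))) (draws.getD t 0) (scores, comp) (s, b)
        = if ¬ comp.contains s = true ∧ pvBoardComplete (PySem.Set.ofList (draws.take (t+1))) b = true then
            (scores ++ [pvBoardScore b (PySem.Set.ofList (draws.take (t+1))) (draws.getD t 0)],
              comp.add s)
          else (scores, comp) := rfl
    by_cases hcond : ¬ comp.contains s = true
        ∧ pvBoardComplete (PySem.Set.ofList (draws.take (t+1))) b = true
    · have hci : pvCompletionIndex b (pvFirstPos draws) = some (t : Int) := by
        rcases hcompl.1 hcond.2 with ⟨c, hc, hle⟩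
        have hnlt : ¬(c < (t : Int)) := fun hlt => hcond.1 (hcontains.2 ⟨c, hc, hlt⟩)
        have hceq : c = (t : Int) := by omega
        rwa [hceq] at hc
      rw [hIS, if_pos hcond]
      have H' : ∀ (k : Nat) (hk : k < bs.length),
          ((comp.add s).contains (s + 1 + (k : Int)) = true ↔
            ∃ c, pvCompletionIndex (bs.get ⟨k, hk⟩) (pvFirstPos draws) = some c ∧ c < (t : Int)) := by
        intro k hk
        have hne : s + 1 + (k : Int) ≠ s := by omega
        have hmem : (comp.add s).contains (s + 1 + (k : Int)) = true
            ↔ comp.contains (s + 1 + (k : Int)) = true := by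
          rw [PySem.Set.contains_iff, PySem.Set.contains_iff, PySem.Set.mem_add]
          constructor
          · rintro (hm | he)
            · exact hm
            · exact absurd he hne
          · exact Or.inl
        have harg : s + ((k + 1 : Nat) : Int) = s + 1 + (k : Int) := by push_cast; ring
        have hH := H (k + 1) (by simpa using Nat.succ_lt_succ hk)
        rw [harg] at hH
        exact hmem.trans hH
      obtain ⟨ih1, ih2⟩ := ih (s + 1) (scores ++ [pvBoardScore b
        (PySem.Set.ofList (draws.take (t+1))) (draws.getD t 0)]) (comp.add s) H'
      refine ⟨?_, fun j => ?_⟩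
      · rw [ih1, List.filter_cons, if_pos (by simp [hci]), List.map_cons]
        have hsc : pvBoardScore b (PySem.Set.ofList (draws.take (t+1))) (draws.getD t 0)
            = pvScoreOf draws (t : Int) b := by
          rw [pv_score draws t ht b, pvScoreOf, PySem.List.pyGetD_natCast]
        rw [hsc]
        simp
      · rw [ih2 j]
        have hadd : (comp.add s).contains j = true ↔ comp.contains j = true ∨ j = s := by
          rw [PySem.Set.contains_iff, PySem.Set.contains_iff, PySem.Set.mem_add]
        constructor
        · rintro (hc | ⟨k, hk, hj, c, hc, hct⟩)
          · rcases hadd.1 hc with hm | he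
            · exact Or.inl hm
            · exact Or.inr ⟨0, by simp, by simpa using he, (t : Int), hci, rfl⟩
          · exact Or.inr ⟨k + 1, by simpa using Nat.succ_lt_succ hk,
              by push_cast; omega, c, hc, hct⟩
        · rintro (hc | ⟨k, hk, hj, c, hc, hct⟩)
          · exact Or.inl (hadd.2 (Or.inl hc))
          · cases k with
            | zero => exact Or.inl (hadd.2 (Or.inr (by simpa using hj)))
            | succ k => exact Or.inr ⟨k, by simpa using Nat.lt_of_succ_lt_succ hk,
                by push_cast at hj ⊢; omega, c, hc, hct⟩
    · have hnotT : ¬(pvCompletionIndex b (pvFirstPos draws) = some (t : Int)) := by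
        intro hc
        rcases not_and_or.1 hcond with hc1 | hc2
        · rcases hcontains.1 (not_not.1 hc1) with ⟨c, hcc, hlt⟩
          rw [hc] at hcc
          have := Option.some.inj hcc
          omega
        · exact hc2 (hcompl.2 ⟨(t : Int), hc, le_refl _⟩)
      rw [hIS, if_neg hcond]
      have H' : ∀ (k : Nat) (hk : k < bs.length),
          (comp.contains (s + 1 + (k : Int)) = true ↔
            ∃ c, pvCompletionIndex (bs.get ⟨k, hk⟩) (pvFirstPos draws) = some c ∧ c < (t : Int)) := by
        intro k hk
        have harg : s + ((k + 1 : Nat) : Int) = s + 1 + (k : Int) := by push_cast; ring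
        have hH := H (k + 1) (by simpa using Nat.succ_lt_succ hk)
        rw [harg] at hH
        exact hH
      obtain ⟨ih1, ih2⟩ := ih (s + 1) scores comp H'
      refine ⟨?_, fun j => ?_⟩
      · rw [ih1, List.filter_cons, if_neg (by simp [hnotT])]
      · rw [ih2 j]
        constructor
        · rintro (hc | ⟨k, hk, hj, c, hc, hct⟩)
          · exact Or.inl hc
          · exact Or.inr ⟨k + 1, by simpa using Nat.succ_lt_succ hk,
              by push_cast; omega, c, hc, hct⟩
        · rintro (hc | ⟨k, hk, hj, c, hc, hct⟩)
          · exact Or.inl hc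
          · cases k with
            | zero =>
              exfalso
              apply hnotT
              have hjs : j = s := by simpa using hj
              rcases hct with hct
              rw [← hct]
              simpa using hc
            | succ k => exact Or.inr ⟨k, by simpa using Nat.lt_of_succ_lt_succ hk,
                by push_cast at hj ⊢; omega, c, hc, hct⟩

theorem pv_outer (draws : List Int) (boards : List (List (List Int))) (t : Nat) (ht : t ≤ draws.length) :
    (((draws.take t).foldl (pvAStep boards) ([], PySem.Set.empty, PySem.Set.empty)).1
      = (PySem.List.pyRange 0 (t : Int) 1).foldl
          (fun out k => out ++ (pvBuckets draws boards).getD k []) [])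
    ∧ (∀ j : Int,
        (((draws.take t).foldl (pvAStep boards) ([], PySem.Set.empty, PySem.Set.empty)).2.1.contains j = true
          ↔ ∃ (k : Nat) (hk : k < boards.length), j = (k : Int) ∧
              ∃ c, pvCompletionIndex (boards.get ⟨k, hk⟩) (pvFirstPos draws) = some c ∧ c < (t : Int)))
    ∧ ((draws.take t).foldl (pvAStep boards) ([], PySem.Set.empty, PySem.Set.empty)).2.2
        = PySem.Set.ofList (draws.take t) := by
  induction t with
  | zero =>
    refine ⟨?_, fun j => ?_, ?_⟩
    · simp [PySem.List.pyRange_one_eq_nil]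
    · constructor
      · intro hc
        rw [PySem.Set.contains_iff] at hc
        simp [PySem.Set.empty] at hc
      · rintro ⟨k, hk, hj, c, hc, hlt⟩
        have := pv_CI_nonneg _ _ _ hc
        omega
    · simp [PySem.Set.empty, PySem.Set.ofList_nil]
  | succ t iht =>
    have htlt : t < draws.length := by omega
    obtain ⟨inv1, inv2, inv3⟩ := iht (by omega)
    have htake : draws.take (t+1) = draws.take t ++ [draws[t]] := by
      rw [List.take_add_one, List.getElem?_eq_getElem htlt]
      rfl
    rw [htake, List.foldl_append, List.foldl_cons, List.foldl_nil]
    have hcalled : PySem.Set.add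
        ((draws.take t).foldl (pvAStep boards) ([], PySem.Set.empty, PySem.Set.empty)).2.2 draws[t]
        = PySem.Set.ofList (draws.take (t+1)) := by
      rw [inv3, ← PySem.Set.ofList_append_singleton, ← htake]
    have hlast : draws[t] = draws.getD t 0 := (List.getD_eq_getElem draws 0 htlt).symm
    have H : ∀ (k : Nat) (hk : k < boards.length),
        (((draws.take t).foldl (pvAStep boards) ([], PySem.Set.empty, PySem.Set.empty)).2.1.contains
            ((0 : Int) + (k : Int)) = true ↔
          ∃ c, pvCompletionIndex (boards.get ⟨k, hk⟩) (pvFirstPos draws) = some c ∧ c < (t : Int)) := by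
      intro k hk
      rw [show (0 : Int) + (k : Int) = (k : Int) by omega, inv2 (k : Int)]
      constructor
      · rintro ⟨k', hk', hj, c, hc, hct⟩
        have hkk : k = k' := by exact_mod_cast hj
        subst hkk
        exact ⟨c, hc, hct⟩
      · rintro ⟨c, hc, hct⟩
        exact ⟨k, hk, rfl, c, hc, hct⟩
    obtain ⟨hi1, hi2⟩ := pv_inner draws t htlt boards 0
      ((draws.take t).foldl (pvAStep boards) ([], PySem.Set.empty, PySem.Set.empty)).1
      ((draws.take t).foldl (pvAStep boards) ([], PySem.Set.empty, PySem.Set.empty)).2.1 H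
    have hAstep : pvAStep boards
        ((draws.take t).foldl (pvAStep boards) ([], PySem.Set.empty, PySem.Set.empty)) draws[t]
        = (((PySem.List.enumerate boards 0).foldl
              (pvIStep (PySem.Set.ofList (draws.take (t+1))) (draws.getD t 0))
              (((draws.take t).foldl (pvAStep boards) ([], PySem.Set.empty, PySem.Set.empty)).1,
               ((draws.take t).foldl (pvAStep boards) ([], PySem.Set.empty, PySem.Set.empty)).2.1)).1,
           ((PySem.List.enumerate boards 0).foldl
              (pvIStep (PySem.Set.ofList (draws.take (t+1))) (draws.getD t 0))
              (((draws.take t).foldl (pvAStep boards) ([], PySem.Set.empty, PySem.Set.empty)).1,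
               ((draws.take t).foldl (pvAStep boards) ([], PySem.Set.empty, PySem.Set.empty)).2.1)).2,
           PySem.Set.ofList (draws.take (t+1))) := by
      rw [pvAStep]
      rw [hcalled, hlast]
    rw [hAstep]
    refine ⟨?_, fun j => ?_, by rw [← htake]⟩
    · rw [hi1, inv1]
      have hr : PySem.List.pyRange 0 (((t+1 : Nat)) : Int) 1
          = PySem.List.pyRange 0 ((t : Nat) : Int) 1 ++ [((t : Nat) : Int)] := by
        have : (((t+1 : Nat)) : Int) = ((t : Nat) : Int) + 1 := by push_cast; ring
        rw [this, PySem.List.pyRange_one_succ_right (by positivity)]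
      rw [hr, List.foldl_append, List.foldl_cons, List.foldl_nil]
      congr 1
      rw [pvBuckets, pv_buckets_getD, PySem.Dict.getD_empty, List.nil_append]
    · rw [hi2 j]
      constructor
      · rintro (hc | ⟨k, hk, hj, c, hc, hct⟩)
        · rcases (inv2 j).1 hc with ⟨k, hk, hj, c, hcc, hlt⟩
          exact ⟨k, hk, hj, c, hcc, by push_cast; omega⟩
        · exact ⟨k, hk, by simpa using hj, c, hc, by push_cast; omega⟩
      · rintro ⟨k, hk, hj, c, hc, hct⟩
        by_cases hlt : c < (t : Int)
        · exact Or.inl ((inv2 j).2 ⟨k, hk, hj, c, hc, hlt⟩)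
        · have hce : c = (t : Int) := by push_cast at hct; omega
          exact Or.inr ⟨k, hk, by simpa using hj, c, hc, hce⟩

-- ===== VERDICT (by name: the statement is the Claim_ definition above) =====
theorem score_all_boards_spec : Claim_equal_score_all_boards := by
  intro draws boards _ _
  show score_all_boards draws boards = score_all_boards_alt draws boards
  by_cases hd : draws = []
  · subst hd; rfl
  · rw [pvA_eq, score_all_boards_alt, if_neg hd]
    have h := (pv_outer draws boards draws.length le_rfl).1
    rw [List.take_length] at h
    exact h
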